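-- pv_equiv track=rewrite | github.com/naydichev/advent-of-code-solutions | 2019/16/puzzle_2.py | apply_phase
-- ===== SOURCE A (Python) =====
-- def apply_phase(digits, offset):
--     num_digits = len(digits)
--     partial = sum(digits[i] for i in range(offset, num_digits))
--
--     for i in range(offset, num_digits):
--         d = digits[i]
--         digits[i] = abs(partial) % 10
--         partial -= d
--
--     return digits
-- ===== SOURCE B (Python) =====
-- def apply_phase(digits, offset):
--     # Right-to-left pass building the suffix digits, then one slice assignment
--     # (mutates `digits` in place and returns it, like the original).
--     total = 0
--     suffix = []
--     for d in reversed(digits[offset:]):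
--         total += d
--         suffix.append(abs(total) % 10)
--     digits[offset:] = reversed(suffix)
--     return digits
-- ===== Notes on version B (the rewrite author's own statement) =====
-- stated objective: alternative
-- what changed: A sums the suffix first and then sweeps forward updating a running partial sum while reading the list being mutated; B makes a single right-to-left pass over the original suffix accumulating the suffix sums into a separate table and writes it back with one slice assignment.
-- outside the precondition, e.g. on apply_phase([1, 2, 3], -1): A returns [6, 5, 3], B returns [1, 2, 3]
import Mathlib
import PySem

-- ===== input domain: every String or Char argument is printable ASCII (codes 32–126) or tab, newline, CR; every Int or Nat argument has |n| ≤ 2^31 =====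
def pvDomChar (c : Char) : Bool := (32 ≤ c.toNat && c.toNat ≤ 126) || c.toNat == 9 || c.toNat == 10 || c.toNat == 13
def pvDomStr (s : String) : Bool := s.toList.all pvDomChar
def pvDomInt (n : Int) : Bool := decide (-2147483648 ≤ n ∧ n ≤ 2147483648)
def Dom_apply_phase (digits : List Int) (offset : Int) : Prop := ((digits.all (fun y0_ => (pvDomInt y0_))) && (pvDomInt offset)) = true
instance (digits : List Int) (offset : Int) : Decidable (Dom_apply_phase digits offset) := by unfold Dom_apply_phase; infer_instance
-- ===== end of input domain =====

-- B replaces A's forward sweep with a running partial sum (which reads the list it is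
-- mutating) by a right-to-left pass that tabulates the suffix sums of the original
-- suffix and writes them back in one slice assignment; same O(n) cost, different
-- decomposition. Both Pythons mutate `digits` in place and return it; the equivalence
-- proved here is about the return value.

-- ===== PORT A =====
def apply_phase (digits : List Int) (offset : Int) : List Int :=
  let numDigits : Int := digits.length
  let partial0 : Int :=
    (PySem.List.pyRange offset numDigits 1).foldl
      (fun s i => s + PySem.List.pyGetD digits i 0) 0
  let res :=
    (PySem.List.pyRange offset numDigits 1).foldl
      (fun (st : List Int × Int) i =>
        let d := PySem.List.pyGetD st.1 i 0
        (PySem.List.pySetD st.1 i (PySem.Int.mod |st.2| 10), st.2 - d))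
      (digits, partial0)
  res.1

-- ===== PORT B =====
def apply_phase_alt (digits : List Int) (offset : Int) : List Int :=
  let tail := PySem.List.slice digits (some offset) none
  let st :=
    tail.reverse.foldl
      (fun (st : Int × List Int) d =>
        (st.1 + d, st.2 ++ [PySem.Int.mod |st.1 + d| 10]))
      (0, [])
  PySem.List.slice digits none (some offset) ++ st.2.reverse

-- ===== PRECONDITION & SPEC =====
-- Pre_ restricts to the function's natural domain of nonnegative offsets: a negative
-- offset makes A read/write through Python negative-index wraparound (and raise
-- IndexError below -len(digits)), which is outside the FFT phase's purpose.
def Pre_apply_phase (digits : List Int) (offset : Int) : Prop := 0 ≤ offset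
instance (digits : List Int) (offset : Int) : Decidable (Pre_apply_phase digits offset) := by unfold Pre_apply_phase; infer_instance
def pvWitness_apply_phase : List Int × Int := ([1, 2, 3], 1)
def Spec_apply_phase (digits : List Int) (offset : Int) (out : List Int) : Prop := out = apply_phase_alt digits offset
instance (digits : List Int) (offset : Int) (out : List Int) : Decidable (Spec_apply_phase digits offset out) := by unfold Spec_apply_phase; infer_instance

-- ===== CLAIM (what is proved, stated in full; the proofs are below) =====
def Claim_equal_apply_phase : Prop := ∀ (digits : List Int) (offset : Int), Dom_apply_phase digits offset → Pre_apply_phase digits offset → Spec_apply_phase digits offset (apply_phase digits offset)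

-- ===== LEMMAS AND PROOFS =====

/-- The common mathematical content: digit `j` of the rewritten suffix is
`|p - (sum of the first j suffix digits)| % 10`. -/
def phaseGo (p : Int) : List Int → List Int
  | [] => []
  | d :: rest => PySem.Int.mod |p| 10 :: phaseGo (p - d) rest

lemma loopA (t : List Int) (pre : List Int) (p : Int) :
    (PySem.List.pyRange (pre.length : Int) ((pre.length : Int) + (t.length : Int)) 1).foldl
      (fun (st : List Int × Int) i =>
        let d := PySem.List.pyGetD st.1 i 0
        (PySem.List.pySetD st.1 i (PySem.Int.mod |st.2| 10), st.2 - d))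
      (pre ++ t, p)
    = (pre ++ phaseGo p t, p - t.sum) := by
  induction t generalizing pre p with
  | nil => simp [PySem.List.pyRange_one_eq_nil, phaseGo]
  | cons d rest ih =>
    rw [PySem.List.pyRange_one_cons (by push_cast [List.length_cons]; omega)]
    simp only [List.foldl_cons]
    have hget : PySem.List.pyGetD (pre ++ d :: rest) (pre.length : Int) 0 = d := by
      simp [List.getD]
    have hset : PySem.List.pySetD (pre ++ d :: rest) (pre.length : Int)
        (PySem.Int.mod |p| 10) = (pre ++ [PySem.Int.mod |p| 10]) ++ rest := by
      simp [PySem.List.pySetD_natCast]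
    have hrange : (pre.length : Int) + 1 = ((pre ++ [PySem.Int.mod |p| 10]).length : Int) := by
      simp
    have hrange2 : (pre.length : Int) + ((rest.length : Int) + 1)
        = ((pre ++ [PySem.Int.mod |p| 10]).length : Int) + (rest.length : Int) := by
      simp; omega
    simp only [hget, hset, List.length_cons]
    rw [show ((rest.length + 1 : Nat) : Int) = (rest.length : Int) + 1 by push_cast; ring,
        show (pre.length : Int) + ((rest.length : Int) + 1)
          = ((pre ++ [PySem.Int.mod |p| 10]).length : Int) + (rest.length : Int) by
            simp; omega,
        hrange, ih]
    simp [phaseGo, List.sum_cons]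
    ring

lemma sumA (t : List Int) (pre : List Int) (s : Int) :
    (PySem.List.pyRange (pre.length : Int) ((pre.length : Int) + (t.length : Int)) 1).foldl
      (fun s i => s + PySem.List.pyGetD (pre ++ t) i 0) s
    = s + t.sum := by
  induction t generalizing pre s with
  | nil => simp [PySem.List.pyRange_one_eq_nil]
  | cons d rest ih =>
    rw [PySem.List.pyRange_one_cons (by push_cast [List.length_cons]; omega)]
    simp only [List.foldl_cons]
    have hget : PySem.List.pyGetD (pre ++ d :: rest) (pre.length : Int) 0 = d := by
      simp [List.getD]
    have := ih (pre := pre ++ [d]) (s := s + d)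
    rw [hget]
    simp only [List.length_cons]
    rw [show ((rest.length + 1 : Nat) : Int) = (rest.length : Int) + 1 by push_cast; ring,
        show (pre.length : Int) + ((rest.length : Int) + 1)
          = ((pre ++ [d]).length : Int) + (rest.length : Int) by simp; omega,
        show (pre.length : Int) + 1 = ((pre ++ [d]).length : Int) by simp]
    rw [show (fun s i => s + PySem.List.pyGetD (pre ++ d :: rest) i 0)
          = (fun s i => s + PySem.List.pyGetD ((pre ++ [d]) ++ rest) i 0) by simp]
    rw [ih]
    simp [List.sum_cons]; ring

lemma loopB (t : List Int) (c : Int) (acc : List Int) :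
    t.reverse.foldl
      (fun (st : Int × List Int) d =>
        (st.1 + d, st.2 ++ [PySem.Int.mod |st.1 + d| 10]))
      (c, acc)
    = (c + t.sum, acc ++ (phaseGo (c + t.sum) t).reverse) := by
  induction t generalizing c acc with
  | nil => simp [phaseGo]
  | cons d rest ih =>
    simp only [List.reverse_cons, List.foldl_append, List.foldl_cons, List.foldl_nil, ih]
    simp only [phaseGo, List.sum_cons, List.reverse_cons]
    rw [show c + (d + rest.sum) - d = c + rest.sum by ring,
        show c + (d + rest.sum) = c + rest.sum + d by ring]
    simp

-- ===== VERDICT (by name: the statement is the Claim_ definition above) =====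
theorem apply_phase_spec : Claim_equal_apply_phase := by
  intro digits offset _ hpre
  unfold Spec_apply_phase apply_phase apply_phase_alt Pre_apply_phase at *
  simp only []
  rw [PySem.List.slice_from digits hpre, PySem.List.slice_to digits hpre]
  by_cases h : offset ≤ (digits.length : Int)
  · -- offset within the list: split digits at offset
    set k := offset.toNat with hk
    have hkle : k ≤ digits.length := by omega
    have hsplit : digits = digits.take k ++ digits.drop k := (List.take_append_drop k digits).symm
    have hlen : ((digits.take k).length : Int) = offset := by
      simp [List.length_take, Nat.min_eq_left hkle]; omega
    rw [loopB]
    conv_lhs => rw [hsplit]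
    rw [show (((digits.take k ++ digits.drop k).length : Nat) : Int)
          = ((digits.take k).length : Int) + ((digits.drop k).length : Int) by
        push_cast [List.length_append]; ring]
    rw [← hlen]
    rw [sumA, loopA]
    simp
  · -- offset past the end: the range is empty on the A side, the suffix empty on B's
    have hnil : PySem.List.pyRange offset ((digits.length : Nat) : Int) 1 = [] :=
      PySem.List.pyRange_one_eq_nil (by omega)
    have hdrop : digits.drop offset.toNat = [] := by
      apply List.drop_eq_nil_of_le; omega
    have htake : digits.take offset.toNat = digits := by
      apply List.take_of_length_le; omega
    rw [hnil, hdrop, htake]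
    simp
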